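-- pv_equiv track=rewrite | github.com/ciula12/pp1 | 09-Test2/p4.py | f
-- ===== SOURCE A (Python) =====
-- def f(dictionary,x,y):
--     result = 0
--     for i in dictionary.keys():
--
--         for j in dictionary[i]:
--             if j==x:
--                 result+=x
--             if j==y:
--                 result+=y
--     return result
--
--
--
--
--
--
--     return True
-- ===== SOURCE B (Python) =====
-- def f(dictionary, x, y):
--     vals = [j for vs in dictionary.values() for j in vs]
--     return x * vals.count(x) + y * vals.count(y)
-- ===== Notes on version B (the rewrite author's own statement) =====
-- stated objective: simpler
-- what changed: Replaces the nested key-lookup loop with running accumulator by flattening all values once and combining the two match counts arithmetically (x*count(x) + y*count(y)).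
import Mathlib
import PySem

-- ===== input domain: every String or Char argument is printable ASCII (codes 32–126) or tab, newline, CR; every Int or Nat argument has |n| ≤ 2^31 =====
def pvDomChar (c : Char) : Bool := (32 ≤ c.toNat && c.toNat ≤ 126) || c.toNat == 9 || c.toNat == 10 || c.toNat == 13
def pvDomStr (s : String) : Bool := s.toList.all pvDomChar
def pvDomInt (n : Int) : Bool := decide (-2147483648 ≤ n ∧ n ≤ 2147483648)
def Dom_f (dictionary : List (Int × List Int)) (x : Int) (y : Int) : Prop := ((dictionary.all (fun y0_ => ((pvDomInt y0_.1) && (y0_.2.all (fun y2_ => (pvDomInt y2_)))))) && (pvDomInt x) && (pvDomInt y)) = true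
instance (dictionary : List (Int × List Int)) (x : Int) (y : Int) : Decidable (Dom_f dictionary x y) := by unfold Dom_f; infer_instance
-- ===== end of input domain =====

-- B flattens the dict's values once and returns x*count(x) + y*count(y) instead of
-- accumulating inside a nested loop over keys: simpler closed-form combination, same cost.


-- ===== PORT A =====
-- for i in dictionary.keys(): for j in dictionary[i]: if j==x: result+=x; if j==y: result+=y
-- `dictionary[i]` with i drawn from keys() always succeeds, ported as getD (exact here).
def f (dictionary : List (Int × List Int)) (x : Int) (y : Int) : Int :=
  let d := PySem.Dict.ofList dictionary
  d.keys.foldl (fun result i =>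
    (d.getD i []).foldl (fun result j =>
      let result := if j == x then result + x else result
      if j == y then result + y else result) result) 0

-- ===== PORT B =====
def f_alt (dictionary : List (Int × List Int)) (x : Int) (y : Int) : Int :=
  let d := PySem.Dict.ofList dictionary
  let vals := d.values.foldl (fun acc vs => acc ++ vs) []
  x * vals.count x + y * vals.count y

-- ===== PRECONDITION & SPEC =====
def Spec_f (dictionary : List (Int × List Int)) (x : Int) (y : Int) (out : Int) : Prop := out = f_alt dictionary x y
instance (dictionary : List (Int × List Int)) (x : Int) (y : Int) (out : Int) : Decidable (Spec_f dictionary x y out) := by unfold Spec_f; infer_instance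

-- ===== CLAIM (what is proved, stated in full; the proofs are below) =====
def Claim_equal_f : Prop := ∀ (dictionary : List (Int × List Int)) (x : Int) (y : Int), Dom_f dictionary x y → Spec_f dictionary x y (f dictionary x y)

-- ===== LEMMAS AND PROOFS =====

theorem foldl_map' {A B C : Type} (g : B → C) (h : A → C → A) (l : List B) (a : A) :
    (l.map g).foldl h a = l.foldl (fun r b => h r (g b)) a := by
  induction l generalizing a with
  | nil => rfl
  | cons b l ih => simp [ih]

-- A's inner loop over one value list adds x per x-match and y per y-match.
theorem inner_loop_eq (x y : Int) (vs : List Int) (a : Int) :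
    vs.foldl (fun result j =>
      let result := if j == x then result + x else result
      if j == y then result + y else result) a
    = a + x * vs.count x + y * vs.count y := by
  induction vs generalizing a with
  | nil => simp
  | cons v vs ih =>
    simp only [List.foldl_cons, ih, List.count_cons]
    by_cases hx : v = x <;> by_cases hy : v = y <;>
      simp [hx, hy, beq_iff_eq] <;> split_ifs with h <;> simp_all <;> ring

-- A's outer loop over the list of value lists equals the counts on the flattened list.
theorem outer_loop_eq (x y : Int) (L : List (List Int)) (a : Int) :
    L.foldl (fun result vs =>
      vs.foldl (fun result j =>
        let result := if j == x then result + x else result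
        if j == y then result + y else result) result) a
    = a + x * L.flatten.count x + y * L.flatten.count y := by
  induction L generalizing a with
  | nil => simp
  | cons vs L ih =>
    rw [List.foldl_cons, inner_loop_eq, ih]
    simp only [List.flatten_cons, List.count_append]
    push_cast; ring

-- B's flattening fold is List.flatten.
theorem foldl_append_eq_flatten (L : List (List Int)) (acc : List Int) :
    L.foldl (fun acc vs => acc ++ vs) acc = acc ++ L.flatten := by
  induction L generalizing acc with
  | nil => simp
  | cons vs L ih => simp [ih]

-- ===== VERDICT (by name: the statement is the Claim_ definition above) =====
theorem f_spec : Claim_equal_f := by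
  intro dictionary x y _
  simp only [Spec_f, f, f_alt]
  have hnd : (PySem.Dict.ofList dictionary).keys.Nodup := PySem.Dict.nodup_keys_ofList _
  have h1 := (foldl_map' (fun k => (PySem.Dict.ofList dictionary).getD k ([] : List Int))
    (fun result vs =>
      vs.foldl (fun result j =>
        let result := if j == x then result + x else result
        if j == y then result + y else result) result)
    (PySem.Dict.ofList dictionary).keys 0).symm
  rw [h1, ← PySem.Dict.values_eq_map_keys _ hnd, outer_loop_eq, foldl_append_eq_flatten]
  simp
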